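-- pv_equiv track=rewrite | github.com/koba925/alds | atcoder/ABC129/D.py | lamp
-- ===== SOURCE A (Python) =====
-- def lamp(H, W, S):
--     hbarrier = [[-1] for _ in range(H)]
--     for r, row in enumerate(S):
--         for c, s in enumerate(row):
--             if s == "#":
--                 hbarrier[r].append(c)
--         hbarrier[r].append(W)
--
--     hspan = [[0] * W for _ in range(H)]
--     for r in range(H):
--         for i in range(len(hbarrier[r]) - 1):
--             for c in range(hbarrier[r][i] + 1, hbarrier[r][i + 1]):
--                 hspan[r][c] = hbarrier[r][i + 1] - hbarrier[r][i] - 1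
--
--     wbarrier = [[-1] for _ in range(W)]
--     for c, col in enumerate(zip(*S)):
--         for r, s in enumerate(col):
--             if s == "#":
--                 wbarrier[c].append(r)
--         wbarrier[c].append(H)
--
--     wspan = [[0] * W for _ in range(H)]
--     for c in range(W):
--         for i in range(len(wbarrier[c]) - 1):
--             for r in range(wbarrier[c][i] + 1, wbarrier[c][i + 1]):
--                 wspan[r][c] = wbarrier[c][i + 1] - wbarrier[c][i] - 1
--
--     max_light = 0
--     for r in range(H):
--         for c in range(W):
--             if S[r][c] == ".":
--                 light = hspan[r][c] + wspan[r][c] - 1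
--                 max_light = max(max_light, light)
--
--     return max_light
-- ===== SOURCE B (Python) =====
-- def _spans(cells):
--     # one pass with a running segment counter; flush the segment length
--     # to all of its cells at each '#' and at the end
--     spans = []
--     seg = 0
--     for ch in cells:
--         if ch == "#":
--             spans.extend([seg] * seg)
--             spans.append(0)
--             seg = 0
--         else:
--             seg += 1
--     spans.extend([seg] * seg)
--     return spans
--
--
-- def lamp(H, W, S):
--     hspan = [_spans(row) for row in S]
--     wspan = [_spans(col) for col in zip(*S)]
--     best = 0
--     for r in range(H):
--         for c in range(W):
--             if S[r][c] == ".":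
--                 best = max(best, hspan[r][c] + wspan[c][r] - 1)
--     return best
-- ===== Notes on version B (the rewrite author's own statement) =====
-- stated objective: simpler
-- what changed: Replaces the barrier-index lists and range-fill loops into preallocated matrices by a single running-counter pass per row and per column that emits each segment's length directly, with the column spans kept column-major.
-- outside the precondition, e.g. on lamp(2, 2, ['...', '..']): A returns 3, B returns 4; on lamp(2, 1, ['.xx', 'x']): A returns 2, B returns 4
import Mathlib
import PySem

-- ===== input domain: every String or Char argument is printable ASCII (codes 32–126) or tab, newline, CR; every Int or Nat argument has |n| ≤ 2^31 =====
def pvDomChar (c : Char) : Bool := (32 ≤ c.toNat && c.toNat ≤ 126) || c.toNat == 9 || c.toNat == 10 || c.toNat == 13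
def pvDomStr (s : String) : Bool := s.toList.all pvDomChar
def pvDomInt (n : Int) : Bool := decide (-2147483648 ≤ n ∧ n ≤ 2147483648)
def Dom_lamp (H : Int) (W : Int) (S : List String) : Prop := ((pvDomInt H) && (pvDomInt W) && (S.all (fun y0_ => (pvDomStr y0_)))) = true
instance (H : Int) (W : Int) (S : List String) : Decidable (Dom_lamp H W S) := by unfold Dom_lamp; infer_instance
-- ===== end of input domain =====

-- B replaces A's barrier-index lists and range-fill loops by a single running-counter
-- pass per row/column that emits each segment's length directly (objective: simpler).

-- ===== PORT A =====

-- m[i] = v / m[i].append(…) on a list: Python raises IndexError out of range; under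
-- Pre_lamp every write below is in range (indices come from barriers ≥ -1 and < W/H),
-- so the total clamp (no-op branch) is never taken on admitted inputs.
def pvUpdRow (m : List (List Int)) (r : Nat) (f : List Int → List Int) : List (List Int) :=
  m.modify r f

def pvSetCell (v : List Int) (i : Int) (x : Int) : List Int :=
  if 0 ≤ i then v.set i.toNat x else v

def pvSetRC (m : List (List Int)) (r : Int) (c : Nat) (x : Int) : List (List Int) :=
  if 0 ≤ r then m.modify r.toNat (fun row => row.set c x) else m

-- hand port of zip(*S) (exact: every index read is < the minimum row length, so the
-- getD default ' ' is never used)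
def pvZipStar (S : List String) : List (List Char) :=
  let ls := S.map (fun s => s.toList)
  let n := ((ls.map List.length).min?).getD 0
  (List.range n).map (fun c => ls.map (fun row => row.getD c ' '))

def lamp (H : Int) (W : Int) (S : List String) : Int :=
  -- hbarrier = [[-1] for _ in range(H)]; collect '#' columns, then append W, per row
  let hbarrier : List (List Int) :=
    (PySem.List.enumerate S).foldl (fun hb p =>
      let hb := (PySem.List.enumerate p.2.toList).foldl (fun hb q =>
          if q.2 = '#' then pvUpdRow hb p.1.toNat (fun b => b ++ [q.1]) else hb) hb
      pvUpdRow hb p.1.toNat (fun b => b ++ [W])) (List.replicate H.toNat [(-1 : Int)])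
  -- hspan = [[0]*W for _ in range(H)]; fill each inter-barrier range with its width
  let hspan : List (List Int) :=
    (List.range H.toNat).foldl (fun hs r =>
      let bar := hbarrier.getD r []
      (List.range (bar.length - 1)).foldl (fun hs i =>
        (PySem.List.pyRange (bar.getD i 0 + 1) (bar.getD (i + 1) 0) 1).foldl (fun hs c =>
          pvUpdRow hs r (fun row => pvSetCell row c (bar.getD (i + 1) 0 - bar.getD i 0 - 1))) hs) hs)
      (List.replicate H.toNat (List.replicate W.toNat (0 : Int)))
  -- wbarrier = [[-1] for _ in range(W)]; same over the columns of zip(*S), append H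
  let wbarrier : List (List Int) :=
    (PySem.List.enumerate (pvZipStar S)).foldl (fun wb p =>
      let wb := (PySem.List.enumerate p.2).foldl (fun wb q =>
          if q.2 = '#' then pvUpdRow wb p.1.toNat (fun b => b ++ [q.1]) else wb) wb
      pvUpdRow wb p.1.toNat (fun b => b ++ [H])) (List.replicate W.toNat [(-1 : Int)])
  -- wspan = [[0]*W for _ in range(H)]; fill column ranges
  let wspan : List (List Int) :=
    (List.range W.toNat).foldl (fun ws c =>
      let bar := wbarrier.getD c []
      (List.range (bar.length - 1)).foldl (fun ws i =>
        (PySem.List.pyRange (bar.getD i 0 + 1) (bar.getD (i + 1) 0) 1).foldl (fun ws r =>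
          pvSetRC ws r c (bar.getD (i + 1) 0 - bar.getD i 0 - 1)) ws) ws)
      (List.replicate H.toNat (List.replicate W.toNat (0 : Int)))
  -- final max loop over '.' cells
  (List.range H.toNat).foldl (fun best r =>
    (List.range W.toNat).foldl (fun best c =>
      if (S.getD r "").toList.getD c ' ' = '.' then
        max best ((hspan.getD r []).getD c 0 + (wspan.getD r []).getD c 0 - 1)
      else best) best) 0

-- ===== PORT B =====

-- _spans: one pass with a running counter, flushing the segment length at '#'/end
def pvSpans (cells : List Char) : List Int :=
  let p := cells.foldl (fun (acc : List Int × Nat) ch =>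
      if ch = '#' then (acc.1 ++ List.replicate acc.2 (acc.2 : Int) ++ [0], 0)
      else (acc.1, acc.2 + 1)) ([], 0)
  p.1 ++ List.replicate p.2 (p.2 : Int)

def lamp_alt (H : Int) (W : Int) (S : List String) : Int :=
  let hspan := S.map (fun row => pvSpans row.toList)
  let wspan := (pvZipStar S).map pvSpans
  (List.range H.toNat).foldl (fun best r =>
    (List.range W.toNat).foldl (fun best c =>
      if (S.getD r "").toList.getD c ' ' = '.' then
        max best ((hspan.getD r []).getD c 0 + (wspan.getD c []).getD r 0 - 1)
      else best) best) 0

-- ===== PRECONDITION & SPEC =====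

-- Pre_ admits the problem's natural domain (exactly H rows of width exactly W) plus
-- the degenerate shapes on which A's final loop is empty and it returns 0 (W ≤ 0 with
-- few enough rows, each a '#'-prefix with some row empty, or H ≤ 0 with no rows);
-- excluded malformed shapes are those where A raises IndexError, and those where A
-- returns a value computed after silently truncating rows longer than W.
def Pre_lamp (H : Int) (W : Int) (S : List String) : Prop :=
  (0 ≤ H ∧ (S.length : Int) = H ∧ ∀ s ∈ S, (s.toList.length : Int) = W)
  ∨ (W ≤ 0 ∧ (S.length : Int) ≤ max H 0
      ∧ S.all (fun s => (s.toList.dropWhile (fun c => c = '#')).all (fun c => c != '#')) = true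
      ∧ (S = [] ∨ ∃ s ∈ S, s.toList.length = 0))
  ∨ (H ≤ 0 ∧ S = [])

instance (H : Int) (W : Int) (S : List String) : Decidable (Pre_lamp H W S) := by
  unfold Pre_lamp; infer_instance

def pvWitness_lamp : Int × Int × List String := (2, 2, ["#.", ".."])

def Spec_lamp (H : Int) (W : Int) (S : List String) (out : Int) : Prop := out = lamp_alt H W S
instance (H : Int) (W : Int) (S : List String) (out : Int) : Decidable (Spec_lamp H W S out) := by unfold Spec_lamp; infer_instance

-- ===== CLAIM (what is proved, stated in full; the proofs are below) =====
def Claim_equal_lamp : Prop := ∀ (H : Int) (W : Int) (S : List String), Dom_lamp H W S → Pre_lamp H W S → Spec_lamp H W S (lamp H W S)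

-- ===== LEMMAS AND PROOFS =====

-- segment lengths of the '#'-split of a line (always nonempty)
def pvBump : List Nat → List Nat
  | [] => [1]
  | a :: r => (a + 1) :: r

def pvSegs : List Char → List Nat
  | [] => [0]
  | c :: t => if c = '#' then 0 :: pvSegs t else pvBump (pvSegs t)

-- per-cell span list a segment-length list denotes
def pvJoin : List Nat → List Int
  | [] => []
  | [a] => List.replicate a (a : Int)
  | a :: b :: r => List.replicate a (a : Int) ++ 0 :: pvJoin (b :: r)

-- absolute positions of '#' in a line starting at offset k
def pvMarks : List Char → Int → List Int
  | [], _ => []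
  | c :: t, k => if c = '#' then k :: pvMarks t (k + 1) else pvMarks t (k + 1)

-- barrier tail from segment lengths, after a barrier at p
def pvRest : List Nat → Int → List Int
  | [], _ => []
  | a :: r, p => (p + a + 1) :: pvRest r (p + a + 1)

-- A's per-line fill loop, on a single vector
def rowFillA (bar : List Int) (v : List Int) : List Int :=
  (List.range (bar.length - 1)).foldl (fun v i =>
    (PySem.List.pyRange (bar.getD i 0 + 1) (bar.getD (i + 1) 0) 1).foldl (fun v c =>
      pvSetCell v c (bar.getD (i + 1) 0 - bar.getD i 0 - 1)) v) v

def pvColOf (m : List (List Int)) (c : Nat) : List Int := m.map (fun row => row.getD c 0)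

def pvFinish (p : List Int × Nat) : List Int := p.1 ++ List.replicate p.2 (p.2 : Int)

def pvAddHead (s : Nat) : List Nat → List Nat
  | [] => [s]
  | a :: r => (s + a) :: r

theorem pvSegs_ne_nil (l : List Char) : pvSegs l ≠ [] := by
  cases l with
  | nil => simp [pvSegs]
  | cons c t =>
    simp only [pvSegs]
    split
    · simp
    · cases h : pvSegs t
      · simp [pvBump]
      · simp [pvBump]

theorem pvAddHead_bump (s : Nat) (ss : List Nat) :
    pvAddHead s (pvBump ss) = pvAddHead (s + 1) ss := by
  cases ss with
  | nil => simp [pvBump, pvAddHead]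
  | cons a r => simp [pvBump, pvAddHead]; omega

theorem pvSpansAux (l : List Char) : ∀ (out : List Int) (seg : Nat),
    pvFinish (l.foldl (fun (acc : List Int × Nat) ch =>
        if ch = '#' then (acc.1 ++ List.replicate acc.2 (acc.2 : Int) ++ [0], 0)
        else (acc.1, acc.2 + 1)) (out, seg))
      = out ++ pvJoin (pvAddHead seg (pvSegs l)) := by
  induction l with
  | nil => intro out seg; simp [pvFinish, pvSegs, pvAddHead, pvJoin]
  | cons c t ih =>
    intro out seg
    by_cases hc : c = '#'
    · obtain ⟨a, r, hr⟩ : ∃ a r, pvSegs t = a :: r := by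
        cases h : pvSegs t with
        | nil => exact absurd h (pvSegs_ne_nil t)
        | cons a r => exact ⟨a, r, rfl⟩
      simp only [List.foldl_cons, hc, ih, pvSegs, hr, pvAddHead]
      simp [pvJoin, List.append_assoc]
    · simp only [List.foldl_cons, pvSegs, if_neg hc, pvAddHead_bump]
      exact ih out (seg + 1)

theorem pvSpans_eq_join (l : List Char) : pvSpans l = pvJoin (pvSegs l) := by
  have h := pvSpansAux l [] 0
  obtain ⟨a, r, hr⟩ : ∃ a r, pvSegs l = a :: r := by
    cases h : pvSegs l with
    | nil => exact absurd h (pvSegs_ne_nil l)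
    | cons a r => exact ⟨a, r, rfl⟩
  simpa [pvSpans, pvFinish, hr, pvAddHead] using h

theorem pvJoin_bump_length (ss : List Nat) :
    (pvJoin (pvBump ss)).length = (pvJoin ss).length + 1 := by
  cases ss with
  | nil => simp [pvBump, pvJoin]
  | cons a r =>
    cases r with
    | nil => simp [pvBump, pvJoin]
    | cons b r' => simp [pvBump, pvJoin]; omega

theorem pvJoin_segs_length (l : List Char) : (pvJoin (pvSegs l)).length = l.length := by
  induction l with
  | nil => simp [pvSegs, pvJoin]
  | cons c t ih =>
    by_cases hc : c = '#'
    · have h1 : pvSegs (c :: t) = 0 :: pvSegs t := by simp [pvSegs, hc]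
      obtain ⟨a, r, hr⟩ : ∃ a r, pvSegs t = a :: r := by
        cases h : pvSegs t with
        | nil => exact absurd h (pvSegs_ne_nil t)
        | cons a r => exact ⟨a, r, rfl⟩
      rw [h1, hr]
      rw [hr] at ih
      simp [pvJoin] at ih ⊢
      omega
    · simp only [pvSegs, if_neg hc, pvJoin_bump_length, ih, List.length_cons]

theorem pvRest_bump (ss : List Nat) (hss : ss ≠ []) (p : Int) :
    pvRest (pvBump ss) (p - 1) = pvRest ss p := by
  cases ss with
  | nil => exact absurd rfl hss
  | cons a r =>
    simp only [pvBump, pvRest]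
    push_cast
    have h : p - 1 + ((a : Int) + 1) + 1 = p + a + 1 := by ring
    rw [h]

theorem pvMarks_rest (l : List Char) : ∀ (k : Int),
    pvMarks l k ++ [k + l.length] = pvRest (pvSegs l) (k - 1) := by
  induction l with
  | nil => intro k; simp [pvMarks, pvSegs, pvRest]
  | cons c t ih =>
    intro k
    have h := ih (k + 1)
    rw [show k + 1 - 1 = k by ring] at h
    by_cases hc : c = '#'
    · simp only [pvMarks, pvSegs, if_pos hc]
      simp only [pvRest, List.cons_append]
      rw [show k - 1 + ((0:Nat):Int) + 1 = k by simp]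
      congr 1
      rw [show (k + (((c :: t).length : Nat) : Int)) = (k + 1) + (t.length : Int) by
        push_cast [List.length_cons]; ring]
      exact h
    · simp only [pvMarks, pvSegs, if_neg hc]
      rw [pvRest_bump _ (pvSegs_ne_nil t)]
      rw [show (k + (((c :: t).length : Nat) : Int)) = (k + 1) + (t.length : Int) by
        push_cast [List.length_cons]; ring]
      exact h

theorem pvUpdRow_comp (m : List (List Int)) (r : Nat) (f g : List Int → List Int) :
    pvUpdRow (pvUpdRow m r f) r g = pvUpdRow m r (fun b => g (f b)) := by
  apply List.ext_getElem
  · simp [pvUpdRow]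
  · intro j h1 h2
    simp [pvUpdRow, List.getElem_modify]
    split <;> rfl

theorem pvUpdRow_foldl {α : Type} (L : List α) (r : Nat) (g : List Int → α → List Int) :
    ∀ m, L.foldl (fun m a => pvUpdRow m r (fun b => g b a)) m
      = pvUpdRow m r (fun b => L.foldl g b) := by
  induction L with
  | nil => intro m; simp only [List.foldl_nil]; exact (List.modify_id r m).symm
  | cons a L ih =>
    intro m
    simp only [List.foldl_cons, ih, pvUpdRow_comp]

theorem pvUpdRow_append (pre z : List (List Int)) (b : List Int) (f : List Int → List Int) :
    pvUpdRow (pre ++ b :: z) pre.length f = pre ++ f b :: z := by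
  apply List.ext_getElem
  · simp [pvUpdRow]
  · intro j h1 h2
    simp only [pvUpdRow, List.getElem_modify]
    rcases lt_trichotomy j pre.length with h | h | h
    · rw [if_neg (by omega), List.getElem_append_left h, List.getElem_append_left h]
    · subst h
      rw [if_pos rfl]
      simp
    · rw [if_neg (by omega), List.getElem_append_right (by omega),
        List.getElem_append_right (by omega)]
      simp [List.getElem_cons, show j - pre.length ≠ 0 by omega]

theorem pvBuildRows {α : Type} (G : α → List Int → List Int) (d : List Int) :
    ∀ (L : List α) (pre suf : List (List Int)),
    (PySem.List.enumerate L (pre.length : Int)).foldl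
        (fun m p => pvUpdRow m p.1.toNat (G p.2)) (pre ++ List.replicate L.length d ++ suf)
      = pre ++ L.map (fun x => G x d) ++ suf := by
  intro L
  induction L with
  | nil => intro pre suf; simp
  | cons x L ih =>
    intro pre suf
    rw [PySem.List.enumerate_cons]
    simp only [List.foldl_cons, List.length_cons, List.replicate_succ, Int.toNat_natCast]
    rw [show pre ++ (d :: List.replicate L.length d) ++ suf
        = pre ++ d :: (List.replicate L.length d ++ suf) by simp, pvUpdRow_append]
    have h1 : (pre.length : Int) + 1 = ((pre ++ [G x d]).length : Int) := by simp
    have h2 : pre ++ G x d :: (List.replicate L.length d ++ suf)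
        = (pre ++ [G x d]) ++ List.replicate L.length d ++ suf := by simp
    rw [h2, h1, ih (pre ++ [G x d]) suf]
    simp

theorem pvMarksFold (l : List Char) : ∀ (k : Int) (b : List Int),
    (PySem.List.enumerate l k).foldl (fun b q => if q.2 = '#' then b ++ [q.1] else b) b
      = b ++ pvMarks l k := by
  induction l with
  | nil => intro k b; simp [PySem.List.enumerate_nil, pvMarks]
  | cons c t ih =>
    intro k b
    rw [PySem.List.enumerate_cons]
    simp only [List.foldl_cons]
    by_cases hc : c = '#'
    · simp [hc, ih, pvMarks]
    · simp [hc, ih, pvMarks]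

theorem pvFillConst (x : Int) : ∀ (mid pre z : List Int),
    (PySem.List.pyRange (pre.length : Int) ((pre.length : Int) + mid.length) 1).foldl
        (fun v c => pvSetCell v c x) (pre ++ mid ++ z)
      = pre ++ List.replicate mid.length x ++ z := by
  intro mid
  induction mid with
  | nil => intro pre z; simp [PySem.List.pyRange_one_eq_nil (le_refl _)]
  | cons y mid ih =>
    intro pre z
    rw [PySem.List.pyRange_one_cons (by push_cast [List.length_cons]; omega)]
    simp only [List.foldl_cons]
    have hstep : pvSetCell (pre ++ y :: mid ++ z) (pre.length : Int) x
        = pre ++ [x] ++ mid ++ z := by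
      simp only [pvSetCell, if_pos (Int.natCast_nonneg pre.length),
        Int.toNat_natCast, List.append_assoc, List.cons_append]
      rw [List.set_append, if_neg (by omega)]
      simp
    rw [hstep]
    have h1 : (pre.length : Int) + 1 = ((pre ++ [x]).length : Int) := by simp
    have h2 : (pre.length : Int) + (((y :: mid).length : Nat) : Int)
        = ((pre ++ [x]).length : Int) + ((mid.length : Nat) : Int) := by
      simp; omega
    rw [h2, h1, ih (pre ++ [x]) z]
    simp [List.replicate_succ]

theorem rowFillA_single (q : Int) (v : List Int) : rowFillA [q] v = v := by
  simp [rowFillA]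

theorem rowFillA_cons (p q : Int) (rest : List Int) (v : List Int) :
    rowFillA (p :: q :: rest) v
      = rowFillA (q :: rest)
          ((PySem.List.pyRange (p + 1) q 1).foldl (fun v c => pvSetCell v c (q - p - 1)) v) := by
  unfold rowFillA
  simp only [List.length_cons, Nat.add_sub_cancel]
  rw [List.range_succ_eq_map, List.foldl_cons, List.foldl_map]
  simp only [List.getD_cons_zero, List.getD_cons_succ, Nat.succ_eq_add_one]

theorem pvFillConst' (x : Int) (n : Nat) (pre z : List Int) (b : Int)
    (hb : b = (pre.length : Int) + n) :
    (PySem.List.pyRange (pre.length : Int) b 1).foldl (fun v c => pvSetCell v c x)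
        (pre ++ List.replicate n 0 ++ z)
      = pre ++ List.replicate n x ++ z := by
  subst hb
  have h := pvFillConst x (List.replicate n 0) pre z
  simpa using h

theorem pvFillMain : ∀ (ss : List Nat) (pre : List Int),
    rowFillA (((pre.length : Int) - 1) :: pvRest ss ((pre.length : Int) - 1))
        (pre ++ List.replicate (pvJoin ss).length 0)
      = pre ++ pvJoin ss := by
  intro ss
  induction ss with
  | nil => intro pre; simp [pvRest, pvJoin, rowFillA]
  | cons a ss ih =>
    intro pre
    simp only [pvRest]
    rw [rowFillA_cons]
    rw [show (pre.length : Int) - 1 + 1 = (pre.length : Int) by ring]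
    rw [show (pre.length : Int) - 1 + (a:Int) + 1 - ((pre.length : Int) - 1) - 1 = ((a:Nat) : Int) by ring]
    cases ss with
    | nil =>
      simp only [pvRest]
      rw [rowFillA_single]
      rw [show pre ++ List.replicate (pvJoin [a]).length (0:Int)
            = pre ++ List.replicate a (0:Int) ++ [] by simp [pvJoin]]
      rw [pvFillConst' ((a:Nat):Int) a pre [] _ (by ring)]
      simp [pvJoin]
    | cons b r =>
      rw [show pre ++ List.replicate (pvJoin (a :: b :: r)).length (0:Int)
            = pre ++ List.replicate a (0:Int) ++ (0 :: List.replicate (pvJoin (b :: r)).length (0:Int)) by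
          rw [show (pvJoin (a :: b :: r)).length = a + ((pvJoin (b :: r)).length + 1) by
            simp [pvJoin]]
          rw [List.replicate_add, List.replicate_succ]
          simp]
      rw [pvFillConst' ((a:Nat):Int) a pre (0 :: List.replicate (pvJoin (b :: r)).length (0:Int)) _ (by ring)]
      rw [show pre ++ List.replicate a (((a:Nat)):Int) ++ (0 :: List.replicate (pvJoin (b :: r)).length (0:Int))
            = (pre ++ List.replicate a (((a:Nat)):Int) ++ [0]) ++ List.replicate (pvJoin (b :: r)).length (0:Int) by simp]
      rw [show (pre.length : Int) - 1 + (a:Int) + 1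
            = ((pre ++ List.replicate a (((a:Nat)):Int) ++ [0]).length : Int) - 1 by simp; ring]
      rw [ih]
      simp [pvJoin]

theorem pvRead (m : List (List Int)) (r c : Nat) :
    (m.getD r []).getD c 0 = (pvColOf m c).getD r 0 := by
  simp only [List.getD_eq_getElem?_getD, pvColOf, List.getElem?_map]
  cases h : m[r]? <;> simp

theorem pvColOf_replicate (n : Nat) (z : List Int) (c : Nat) (hz : z.getD c 0 = 0) :
    pvColOf (List.replicate n z) c = List.replicate n 0 := by
  unfold pvColOf
  rw [List.map_replicate, hz]

theorem pvGetD_zero_replicate (w c : Nat) : (List.replicate w (0:Int)).getD c 0 = 0 := by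
  rw [List.getD_eq_getElem?_getD, List.getElem?_replicate]
  split <;> rfl

theorem pvColOf_setRC_self (m : List (List Int)) (r : Int) (c : Nat) (x : Int) (W : Nat)
    (hc : c < W) (hrow : ∀ row ∈ m, row.length = W) :
    pvColOf (pvSetRC m r c x) c = pvSetCell (pvColOf m c) r x := by
  unfold pvSetRC pvSetCell
  split
  · apply List.ext_getElem
    · simp [pvColOf]
    · intro j h1 h2
      simp only [pvColOf, List.getElem_map, List.getElem_modify, List.getElem_set]
      split
      · next heq =>
        have hj : j < m.length := by simpa [pvColOf] using h2
        have hcW : c < (m[j]).length := by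
          rw [hrow _ (List.getElem_mem hj)]; exact hc
        rw [List.getD_eq_getElem?_getD, List.getElem?_set_self']
        simp [hcW]
      · rfl
  · rfl

theorem pvColOf_setRC_ne (m : List (List Int)) (r : Int) (c c' : Nat) (x : Int)
    (hne : c' ≠ c) :
    pvColOf (pvSetRC m r c x) c' = pvColOf m c' := by
  unfold pvSetRC
  split
  · apply List.ext_getElem
    · simp [pvColOf]
    · intro j h1 h2
      simp only [pvColOf, List.getElem_map, List.getElem_modify]
      split
      · rw [List.getD_eq_getElem?_getD, List.getElem?_set_ne (fun h => hne h.symm),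
          ← List.getD_eq_getElem?_getD]
      · rfl
  · rfl

theorem pvSetRC_rows (m : List (List Int)) (r : Int) (c : Nat) (x : Int) (W : Nat)
    (hrow : ∀ row ∈ m, row.length = W) :
    ∀ row ∈ pvSetRC m r c x, row.length = W := by
  unfold pvSetRC
  split
  · intro row h
    obtain ⟨j, hj, hrw⟩ := List.mem_iff_getElem.mp h
    rw [List.getElem_modify] at hrw
    split at hrw
    · rw [← hrw, List.length_set]
      exact hrow _ (List.getElem_mem _)
    · rw [← hrw]
      exact hrow _ (List.getElem_mem _)
  · exact hrow

theorem pvColFold1 (L : List Int) (c : Nat) (x : Int) (W : Nat) (hc : c < W) :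
    ∀ m, (∀ row ∈ m, row.length = W) →
      (pvColOf (L.foldl (fun m r => pvSetRC m r c x) m) c
          = L.foldl (fun v r => pvSetCell v r x) (pvColOf m c))
      ∧ (∀ c', c' ≠ c → pvColOf (L.foldl (fun m r => pvSetRC m r c x) m) c' = pvColOf m c')
      ∧ (∀ row ∈ L.foldl (fun m r => pvSetRC m r c x) m, row.length = W) := by
  induction L with
  | nil => intro m hrow; exact ⟨rfl, fun _ _ => rfl, hrow⟩
  | cons a L ih =>
    intro m hrow
    have hrow' := pvSetRC_rows m a c x W hrow
    obtain ⟨h1, h2, h3⟩ := ih (pvSetRC m a c x) hrow'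
    refine ⟨?_, ?_, by simpa using h3⟩
    · simp only [List.foldl_cons, h1, pvColOf_setRC_self m a c x W hc hrow]
    · intro c' hne
      simp only [List.foldl_cons, h2 c' hne, pvColOf_setRC_ne m a c c' x hne]

theorem pvColFold2 (I : List Nat) (bar : List Int) (c : Nat) (W : Nat) (hc : c < W) :
    ∀ m, (∀ row ∈ m, row.length = W) →
      (pvColOf (I.foldl (fun m i =>
            (PySem.List.pyRange (bar.getD i 0 + 1) (bar.getD (i + 1) 0) 1).foldl
              (fun m r => pvSetRC m r c (bar.getD (i + 1) 0 - bar.getD i 0 - 1)) m) m) c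
          = I.foldl (fun v i =>
            (PySem.List.pyRange (bar.getD i 0 + 1) (bar.getD (i + 1) 0) 1).foldl
              (fun v r => pvSetCell v r (bar.getD (i + 1) 0 - bar.getD i 0 - 1)) v) (pvColOf m c))
      ∧ (∀ c', c' ≠ c → pvColOf (I.foldl (fun m i =>
            (PySem.List.pyRange (bar.getD i 0 + 1) (bar.getD (i + 1) 0) 1).foldl
              (fun m r => pvSetRC m r c (bar.getD (i + 1) 0 - bar.getD i 0 - 1)) m) m) c'
          = pvColOf m c')
      ∧ (∀ row ∈ I.foldl (fun m i =>
            (PySem.List.pyRange (bar.getD i 0 + 1) (bar.getD (i + 1) 0) 1).foldl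
              (fun m r => pvSetRC m r c (bar.getD (i + 1) 0 - bar.getD i 0 - 1)) m) m,
          row.length = W) := by
  induction I with
  | nil => intro m hrow; exact ⟨rfl, fun _ _ => rfl, hrow⟩
  | cons i I ih =>
    intro m hrow
    obtain ⟨g1, g2, g3⟩ := pvColFold1
      (PySem.List.pyRange (bar.getD i 0 + 1) (bar.getD (i + 1) 0) 1) c
      (bar.getD (i + 1) 0 - bar.getD i 0 - 1) W hc m hrow
    obtain ⟨h1, h2, h3⟩ := ih _ g3
    refine ⟨?_, ?_, by simpa using h3⟩
    · simp only [List.foldl_cons, h1, g1]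
    · intro c' hne
      simp only [List.foldl_cons, h2 c' hne, g2 c' hne]

theorem pvWspanChar (wb : List (List Int)) (Hn Wn : Nat) : ∀ (k : Nat), k ≤ Wn →
    (∀ row ∈ (List.range k).foldl (fun ws c =>
        (List.range ((wb.getD c []).length - 1)).foldl (fun ws i =>
          (PySem.List.pyRange ((wb.getD c []).getD i 0 + 1) ((wb.getD c []).getD (i + 1) 0) 1).foldl
            (fun ws r => pvSetRC ws r c ((wb.getD c []).getD (i + 1) 0 - (wb.getD c []).getD i 0 - 1)) ws) ws)
        (List.replicate Hn (List.replicate Wn (0:Int))), row.length = Wn)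
    ∧ (∀ c, c < Wn →
        pvColOf ((List.range k).foldl (fun ws c =>
          (List.range ((wb.getD c []).length - 1)).foldl (fun ws i =>
            (PySem.List.pyRange ((wb.getD c []).getD i 0 + 1) ((wb.getD c []).getD (i + 1) 0) 1).foldl
              (fun ws r => pvSetRC ws r c ((wb.getD c []).getD (i + 1) 0 - (wb.getD c []).getD i 0 - 1)) ws) ws)
          (List.replicate Hn (List.replicate Wn (0:Int)))) c
        = if c < k then rowFillA (wb.getD c []) (List.replicate Hn 0) else List.replicate Hn 0) := by
  intro k
  induction k with
  | zero =>
    intro _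
    constructor
    · intro row h
      have hr : row = List.replicate Wn (0:Int) := List.eq_of_mem_replicate (by simpa using h)
      rw [hr]
      simp
    · intro c _
      simp [pvColOf_replicate _ _ _ (pvGetD_zero_replicate Wn c)]
  | succ k ih =>
    intro hk
    obtain ⟨ih1, ih2⟩ := ih (by omega)
    rw [List.range_succ, List.foldl_append, List.foldl_cons, List.foldl_nil]
    obtain ⟨g1, g2, g3⟩ := pvColFold2 (List.range ((wb.getD k []).length - 1))
      (wb.getD k []) k Wn (by omega) _ ih1
    refine ⟨g3, ?_⟩
    intro c hc
    by_cases hck : c = k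
    · subst hck
      rw [g1, ih2 c hc, if_neg (lt_irrefl c), if_pos (Nat.lt_succ_self c)]
      rfl
    · rw [g2 c hck, ih2 c hc]
      by_cases h2 : c < k
      · rw [if_pos h2, if_pos (show c < k + 1 by omega)]
      · rw [if_neg h2, if_neg (show ¬ c < k + 1 by omega)]

theorem pvBarrierFold {α : Type} (toL : α → List Char) (E : Int) (L : List α) (n : Nat)
    (hn : L.length = n) :
    (PySem.List.enumerate L).foldl (fun hb p =>
        pvUpdRow ((PySem.List.enumerate (toL p.2)).foldl (fun hb q =>
            if q.2 = '#' then pvUpdRow hb p.1.toNat (fun b => b ++ [q.1]) else hb) hb)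
          p.1.toNat (fun b => b ++ [E])) (List.replicate n [(-1 : Int)])
      = L.map (fun y => [(-1:Int)] ++ pvMarks (toL y) 0 ++ [E]) := by
  subst hn
  have hfun : (fun (hb : List (List Int)) (p : Int × α) =>
      pvUpdRow ((PySem.List.enumerate (toL p.2)).foldl (fun hb q =>
          if q.2 = '#' then pvUpdRow hb p.1.toNat (fun b => b ++ [q.1]) else hb) hb)
        p.1.toNat (fun b => b ++ [E]))
      = (fun hb p => pvUpdRow hb p.1.toNat (fun b => b ++ pvMarks (toL p.2) 0 ++ [E])) := by
    funext hb p
    rw [show (fun (hb : List (List Int)) (q : Int × Char) =>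
          if q.2 = '#' then pvUpdRow hb p.1.toNat (fun b => b ++ [q.1]) else hb)
        = (fun hb q => pvUpdRow hb p.1.toNat (fun b => if q.2 = '#' then b ++ [q.1] else b)) by
      funext hb q
      split
      · rfl
      · exact (List.modify_id _ _).symm]
    rw [pvUpdRow_foldl, pvUpdRow_comp]
    congr 1
    funext b
    rw [pvMarksFold]
  rw [hfun]
  have h := pvBuildRows (fun y b => b ++ pvMarks (toL y) 0 ++ [E]) [(-1:Int)] L [] []
  simpa using h

theorem pvSpanFold (hb : List (List Int)) (n : Nat) (init : List (List Int)) :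
    (List.range n).foldl (fun hs r =>
      (List.range ((hb.getD r []).length - 1)).foldl (fun hs i =>
        (PySem.List.pyRange ((hb.getD r []).getD i 0 + 1) ((hb.getD r []).getD (i + 1) 0) 1).foldl
          (fun hs c => pvUpdRow hs r (fun row =>
            pvSetCell row c ((hb.getD r []).getD (i + 1) 0 - (hb.getD r []).getD i 0 - 1))) hs) hs) init
    = (List.range n).foldl (fun hs r => pvUpdRow hs r (rowFillA (hb.getD r []))) init := by
  apply PySem.List.foldl_congr_mem
  intro hs r _
  rw [show (fun (hs : List (List Int)) (i : Nat) =>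
        (PySem.List.pyRange ((hb.getD r []).getD i 0 + 1) ((hb.getD r []).getD (i + 1) 0) 1).foldl
          (fun hs c => pvUpdRow hs r (fun row =>
            pvSetCell row c ((hb.getD r []).getD (i + 1) 0 - (hb.getD r []).getD i 0 - 1))) hs)
      = (fun hs i => pvUpdRow hs r (fun row =>
          (PySem.List.pyRange ((hb.getD r []).getD i 0 + 1) ((hb.getD r []).getD (i + 1) 0) 1).foldl
            (fun row c => pvSetCell row c ((hb.getD r []).getD (i + 1) 0 - (hb.getD r []).getD i 0 - 1)) row)) by
    funext hs i
    exact pvUpdRow_foldl _ r _ hs]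
  rw [pvUpdRow_foldl]
  rfl

theorem pvBuildRange (F : Nat → List Int → List Int) (d : List Int) :
    ∀ (n : Nat) (pre suf : List (List Int)),
    (List.range' pre.length n).foldl (fun m r => pvUpdRow m r (F r))
        (pre ++ List.replicate n d ++ suf)
      = pre ++ (List.range' pre.length n).map (fun r => F r d) ++ suf := by
  intro n
  induction n with
  | zero => intro pre suf; simp
  | succ n ih =>
    intro pre suf
    rw [List.range'_succ, List.foldl_cons, List.map_cons]
    rw [show pre ++ List.replicate (n + 1) d ++ suf
        = pre ++ d :: (List.replicate n d ++ suf) by simp [List.replicate_succ]]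
    rw [pvUpdRow_append]
    rw [show pre ++ F pre.length d :: (List.replicate n d ++ suf)
        = (pre ++ [F pre.length d]) ++ List.replicate n d ++ suf by simp]
    rw [show pre.length + 1 = (pre ++ [F pre.length d]).length by simp]
    rw [ih (pre ++ [F pre.length d]) suf]
    simp

theorem pvBuildRange0 (F : Nat → List Int → List Int) (d : List Int) (n : Nat) :
    (List.range n).foldl (fun m r => pvUpdRow m r (F r)) (List.replicate n d)
      = (List.range n).map (fun r => F r d) := by
  have h := pvBuildRange F d n [] []
  simpa [List.range_eq_range'] using h

theorem pvFoldlMinConst (Wn : Nat) : ∀ (m : Nat), List.foldl min Wn (List.replicate m Wn) = Wn := by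
  intro m
  induction m with
  | zero => rfl
  | succ m ih => simp [List.replicate_succ, ih]

theorem pvZipStar_char (S : List String) (Wn : Nat) (hS : S ≠ [])
    (hrow : ∀ s ∈ S, s.toList.length = Wn) :
    pvZipStar S = (List.range Wn).map (fun c => S.map (fun s => s.toList.getD c ' ')) := by
  simp only [pvZipStar]
  have hrep : (S.map (fun s => s.toList)).map List.length = List.replicate S.length Wn := by
    rw [List.map_map]
    apply List.eq_replicate_iff.mpr
    constructor
    · simp
    · intro b hb
      obtain ⟨s, hs, hb'⟩ := List.mem_map.mp hb
      rw [← hb']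
      exact hrow s hs
  rw [hrep]
  obtain ⟨s, S', hS'⟩ : ∃ s S', S = s :: S' := by
    cases S with
    | nil => exact absurd rfl hS
    | cons s S' => exact ⟨s, S', rfl⟩
  rw [show List.replicate S.length Wn = Wn :: List.replicate S'.length Wn by
    rw [hS']; simp [List.replicate_succ]]
  rw [List.min?_cons']
  simp only [Option.getD_some]
  rw [show List.foldl min Wn (List.replicate S'.length Wn) = Wn from pvFoldlMinConst Wn S'.length]
  apply List.map_congr_left
  intro c _
  rw [List.map_map]
  rfl

theorem pvGetD_map_lt {α β : Type} (f : α → β) (l : List α) (r : Nat) (d₁ : α) (d₂ : β)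
    (h : r < l.length) : (l.map f).getD r d₂ = f (l.getD r d₁) := by
  rw [List.getD_eq_getElem?_getD, List.getElem?_map, List.getD_eq_getElem?_getD,
    List.getElem?_eq_getElem h]
  rfl

theorem pvGetD_range_map {β : Type} (f : Nat → β) (n c : Nat) (d : β) (h : c < n) :
    ((List.range n).map f).getD c d = f c := by
  rw [pvGetD_map_lt f _ c 0 d (by simpa using h)]
  congr 1
  rw [List.getD_eq_getElem?_getD, List.getElem?_range h]
  rfl

theorem pvBarRow (l : List Char) (E : Int) (hE : E = (l.length : Int)) :
    [(-1:Int)] ++ pvMarks l 0 ++ [E] = (-1:Int) :: pvRest (pvSegs l) (-1) := by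
  have h := pvMarks_rest l 0
  simp only [zero_add, zero_sub] at h
  rw [hE, List.append_assoc, h, List.singleton_append]

theorem pvRowFill_join (l : List Char) (Wn : Nat) (hl : l.length = Wn) :
    rowFillA ((-1:Int) :: pvRest (pvSegs l) (-1)) (List.replicate Wn (0:Int)) = pvJoin (pvSegs l) := by
  have h := pvFillMain (pvSegs l) []
  simp only [List.length_nil, Nat.cast_zero, zero_sub, List.nil_append] at h
  rw [pvJoin_segs_length, hl] at h
  exact h

def pvCommon (Hn Wn : Nat) (S : List String) : Int :=
  (List.range Hn).foldl (fun best r =>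
    (List.range Wn).foldl (fun best c =>
      if (S.getD r "").toList.getD c ' ' = '.' then
        max best ((pvJoin (pvSegs (S.getD r "").toList)).getD c 0
          + (pvJoin (pvSegs (S.map (fun s => s.toList.getD c ' ')))).getD r 0 - 1)
      else best) best) 0

theorem lampB_common (H W : Int) (S : List String) (hS : S ≠ [])
    (hlen : S.length = H.toNat) (hrowW : ∀ s ∈ S, s.toList.length = W.toNat) :
    lamp_alt H W S = pvCommon H.toNat W.toNat S := by
  simp only [lamp_alt, pvCommon]
  rw [pvZipStar_char S W.toNat hS hrowW]
  apply PySem.List.foldl_congr_mem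
  intro best r hr
  apply PySem.List.foldl_congr_mem
  intro acc c hc
  have hr' : r < S.length := by rw [hlen]; simpa using hr
  have hc' : c < W.toNat := by simpa using hc
  rw [pvGetD_map_lt (fun row => pvSpans row.toList) S r "" [] hr']
  rw [List.map_map]
  rw [pvGetD_range_map (pvSpans ∘ fun c => S.map fun s => s.toList.getD c ' ') W.toNat c [] hc']
  simp only [Function.comp]
  rw [pvSpans_eq_join, pvSpans_eq_join]

theorem lampA_common (H W : Int) (S : List String) (hH : 0 ≤ H) (hW : 0 ≤ W) (hS : S ≠ [])
    (hlen : S.length = H.toNat) (hrowW : ∀ s ∈ S, s.toList.length = W.toNat) :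
    lamp H W S = pvCommon H.toNat W.toNat S := by
  have hWcast : ((W.toNat : Nat) : Int) = W := by omega
  have hHcast : ((H.toNat : Nat) : Int) = H := by omega
  simp only [lamp, pvCommon]
  rw [pvZipStar_char S W.toNat hS hrowW]
  rw [pvBarrierFold (fun s => s.toList) W S H.toNat hlen]
  rw [pvBarrierFold (fun c => c) H
    ((List.range W.toNat).map fun c => S.map fun s => s.toList.getD c ' ') W.toNat (by simp)]
  rw [pvSpanFold]
  rw [pvBuildRange0]
  apply PySem.List.foldl_congr_mem
  intro best r hr
  apply PySem.List.foldl_congr_mem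
  intro acc c hc
  have hr' : r < H.toNat := by simpa using hr
  have hc' : c < W.toNat := by simpa using hc
  have hrS : r < S.length := by omega
  have hmem : S.getD r "" ∈ S := by
    rw [List.getD_eq_getElem?_getD, List.getElem?_eq_getElem hrS]
    exact List.getElem_mem hrS
  have hlW : (S.getD r "").toList.length = W.toNat := hrowW _ hmem
  -- horizontal span read
  rw [pvGetD_range_map (fun r =>
      rowFillA ((S.map (fun y => [(-1:Int)] ++ pvMarks y.toList 0 ++ [W])).getD r [])
        (List.replicate W.toNat 0)) H.toNat r [] hr']
  rw [pvGetD_map_lt (fun y => [(-1:Int)] ++ pvMarks y.toList 0 ++ [W]) S r "" [] hrS]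
  rw [pvBarRow _ W (by rw [hlW, hWcast])]
  rw [pvRowFill_join _ W.toNat hlW]
  -- vertical span read
  rw [pvRead]
  rw [((pvWspanChar (((List.range W.toNat).map fun c =>
        S.map fun s => s.toList.getD c ' ').map (fun y => [(-1:Int)] ++ pvMarks ((fun c => c) y) 0 ++ [H]))
      H.toNat W.toNat W.toNat (le_refl _)).2 c hc')]
  rw [if_pos hc']
  rw [List.map_map]
  rw [pvGetD_range_map ((fun y => [(-1:Int)] ++ pvMarks ((fun c => c) y) 0 ++ [H]) ∘ fun c =>
      S.map fun s => s.toList.getD c ' ') W.toNat c [] hc']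
  simp only [Function.comp]
  rw [pvBarRow _ H (by rw [List.length_map, hlen, hHcast])]
  rw [pvRowFill_join _ H.toNat (by rw [List.length_map, hlen])]

-- ===== VERDICT (by name: the statement is the Claim_ definition above) =====
theorem lamp_spec : Claim_equal_lamp := by
  intro H W S _ hpre
  unfold Spec_lamp
  by_cases hW : W.toNat = 0
  · simp [lamp, lamp_alt, hW]
  by_cases hHn : H.toNat = 0
  · simp [lamp, lamp_alt, hHn]
  obtain ⟨hH, hlen, hrow⟩ : 0 ≤ H ∧ (S.length : Int) = H ∧ ∀ s ∈ S, (s.toList.length : Int) = W := by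
    rcases hpre with h | h | h
    · exact h
    · exact absurd (by omega : W.toNat = 0) hW
    · exact absurd (by omega : H.toNat = 0) hHn
  have hS : S ≠ [] := by
    intro he
    subst he
    simp at hlen
    omega
  have hlen' : S.length = H.toNat := by omega
  have hrowW : ∀ s ∈ S, s.toList.length = W.toNat := by
    intro s hs
    have h1 := hrow s hs
    omega
  have hW0 : 0 ≤ W := by
    obtain ⟨s, hs⟩ := List.exists_mem_of_ne_nil S hS
    have h1 := hrow s hs
    omega
  rw [lampA_common H W S hH hW0 hS hlen' hrowW, lampB_common H W S hS hlen' hrowW]
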